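-- pv_equiv track=rewrite | github.com/CharlesCowdery/Project-4-EV3 | navigation_r.py | purge
-- ===== SOURCE A (Python) =====
-- def purge(array,endian):
--     new_arr = []
--     for i in range(len(array)):
--         value = array[i]
--         if(value==endian):
--             break
--         new_arr.append(value)
--     return new_arr
-- ===== SOURCE B (Python) =====
-- def purge(array, endian):
--     try:
--         idx = array.index(endian)
--     except ValueError:
--         idx = len(array)
--     return list(array[:idx])
-- ===== Notes on version B (the rewrite author's own statement) =====
-- stated objective: simpler
-- what changed: Replaces the element-by-element accumulate-and-break loop with a find-the-sentinel-then-slice decomposition (array.index + a single slice).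
import Mathlib
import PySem

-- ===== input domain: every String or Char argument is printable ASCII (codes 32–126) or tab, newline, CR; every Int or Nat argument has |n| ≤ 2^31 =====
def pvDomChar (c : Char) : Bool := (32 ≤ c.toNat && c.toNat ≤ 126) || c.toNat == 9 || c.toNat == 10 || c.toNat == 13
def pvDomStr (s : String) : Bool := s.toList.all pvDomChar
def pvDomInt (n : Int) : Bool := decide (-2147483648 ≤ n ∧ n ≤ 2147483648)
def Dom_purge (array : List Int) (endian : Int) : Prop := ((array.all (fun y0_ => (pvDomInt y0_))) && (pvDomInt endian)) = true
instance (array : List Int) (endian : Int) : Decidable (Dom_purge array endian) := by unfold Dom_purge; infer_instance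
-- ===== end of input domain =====

-- B finds the sentinel index first and returns one slice, instead of A's accumulate-and-break loop (objective: simpler).


-- ===== PORT A =====
-- structural recursion over the list: scan left to right, stop at the sentinel
def purge (array : List Int) (endian : Int) : List Int :=
  match array with
  | [] => []
  | x :: xs => if x == endian then [] else x :: purge xs endian

-- ===== PORT B =====
-- B: find the sentinel's index first, then take one slice
def purge_alt (array : List Int) (endian : Int) : List Int :=
  match PySem.List.index? array endian with
  | some i => PySem.List.slice array none (some (i : Int))
  | none => array

-- ===== PRECONDITION & SPEC =====
def Spec_purge (array : List Int) (endian : Int) (out : List Int) : Prop := out = purge_alt array endian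
instance (array : List Int) (endian : Int) (out : List Int) : Decidable (Spec_purge array endian out) := by unfold Spec_purge; infer_instance

-- ===== CLAIM (what is proved, stated in full; the proofs are below) =====
def Claim_equal_purge : Prop := ∀ (array : List Int) (endian : Int), Dom_purge array endian → Spec_purge array endian (purge array endian)

-- ===== LEMMAS AND PROOFS =====

-- ===== VERDICT (by name: the statement is the Claim_ definition above) =====
lemma purge_alt_eq_purge (array : List Int) (endian : Int) :
    purge_alt array endian = purge array endian := by
  induction array with
  | nil => simp [purge, purge_alt, PySem.List.index?]
  | cons x xs ih =>
    by_cases hx : x = endian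
    · subst hx
      rw [purge_alt, PySem.List.index?_cons_self]
      show PySem.List.slice (x :: xs) none (some ((0 : ℕ) : Int)) = purge (x :: xs) x
      rw [PySem.List.slice_to_natCast]
      simp [purge]
    · rw [purge_alt, PySem.List.index?_cons_of_ne _ hx]
      rw [purge_alt] at ih
      cases h : PySem.List.index? xs endian with
      | none =>
        rw [h] at ih
        simp [purge, hx, ← ih]
      | some i =>
        rw [h] at ih
        simp only [Option.map_some]
        show PySem.List.slice (x :: xs) none (some ((i : Int) + 1)) = purge (x :: xs) endian
        have hc : ((i : Int) + 1) = ((i + 1 : ℕ) : Int) := by push_cast; ring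
        rw [hc, PySem.List.slice_to_natCast]
        change PySem.List.slice xs none (some ((i : ℕ) : Int)) = purge xs endian at ih
        rw [PySem.List.slice_to_natCast] at ih
        simp [purge, hx, List.take_succ_cons, ih]

theorem purge_spec : Claim_equal_purge := by
  intro array endian _
  unfold Spec_purge
  exact (purge_alt_eq_purge array endian).symm
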